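-- pv_equiv track=rewrite | github.com/emordonez/project-euler | python/p013.py | solution_13
-- ===== SOURCE A (Python) =====
-- def solution_13(nums, num_length, n):
--     """Adds all the numbers then slices the first n characters of the sum as a
--     string.
--     """
--     # Although Python can handle arbitrarily large numbers, this addition
--     # algorithm is more space efficient
--     total_sum_str = ""
--     carry = 0
--     for i in reversed(range(num_length)):
--         digits_sum = carry
--         for num in nums:
--             digits_sum += int(num[i])
--         total_sum_str += str(digits_sum % 10)
--         carry = digits_sum // 10
--
--     if carry != 0:
--         total_sum_str += str(carry)
--         total_sum_str = total_sum_str[::-1]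
--
--     return total_sum_str[:n]
-- ===== SOURCE B (Python) =====
-- def _column_sums(nums, num_length):
--     """Phase 1: full table of per-column digit sums, built by a scatter pass
--     with loop order transposed relative to A (per number, then per column)."""
--     cols = [0] * num_length
--     for num in nums:
--         for i in range(num_length):
--             cols[i] += int(num[i])
--     return cols
--
--
-- def _carry_pass(cols, num_length):
--     """Phase 2: independent carry propagation over the finished table,
--     walking indices from the end, collecting digit pieces LSB-first."""
--     pieces = []
--     carry = 0
--     i = num_length - 1
--     while i >= 0:
--         digits_sum = carry + cols[i]
--         pieces.append(str(digits_sum % 10))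
--         carry = digits_sum // 10
--         i -= 1
--     return pieces, carry
--
--
-- def solution_13(nums, num_length, n):
--     """Adds all the numbers then slices the first n characters of the sum as a
--     string."""
--     cols = _column_sums(nums, num_length)
--     pieces, carry = _carry_pass(cols, num_length)
--     total_sum_str = "".join(pieces)
--     if carry != 0:
--         total_sum_str += str(carry)
--         total_sum_str = total_sum_str[::-1]
--     return total_sum_str[:n]
-- ===== Notes on version B (the rewrite author's own statement) =====
-- stated objective: alternative
-- what changed: A interleaves digit summation and carry propagation in a single column-at-a-time pass with an inner scan over the numbers; B is staged: a scatter pass with transposed loop order (per number, then per column) first builds the complete column-sums table, then a separate index-walking carry pass over the finished table collects digit pieces that are joined once.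
import Mathlib
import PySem

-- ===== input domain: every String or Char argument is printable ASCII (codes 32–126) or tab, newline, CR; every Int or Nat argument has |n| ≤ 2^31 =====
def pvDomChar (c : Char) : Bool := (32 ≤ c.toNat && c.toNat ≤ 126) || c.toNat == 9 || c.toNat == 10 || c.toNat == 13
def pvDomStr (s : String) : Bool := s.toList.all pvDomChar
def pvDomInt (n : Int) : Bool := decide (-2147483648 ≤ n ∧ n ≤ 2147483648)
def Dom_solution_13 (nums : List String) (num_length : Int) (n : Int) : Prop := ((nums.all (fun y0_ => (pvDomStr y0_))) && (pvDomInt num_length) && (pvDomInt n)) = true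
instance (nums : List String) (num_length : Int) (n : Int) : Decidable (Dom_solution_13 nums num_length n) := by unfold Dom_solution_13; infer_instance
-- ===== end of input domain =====

-- B re-implements A in two separate stages — a scatter pass with transposed loop order building the
-- full column-sums table, then an independent index-walking carry pass over it ('alternative'; same cost);
-- return values proved equal on Pre_.

-- ===== PORT A =====
-- int(num[i]) on the 1-character string num[i]: none = IndexError / ValueError, excluded by Pre_ (getD 0 never reached inside Pre_).
def pyIntAt (num : String) (i : Int) : Int :=
  ((PySem.Str.pyGet? num i).bind (fun c => PySem.Int.ofChars? [c])).getD 0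

-- Literal transliteration of A: one pass over reversed(range(num_length)) with an inner scan over nums;
-- the growing string is kept as List Char (PySem strings are defined on List Char; += is ++).
def solution_13 (nums : List String) (num_length : Int) (n : Int) : String :=
  let r := ((PySem.List.pyRange 0 num_length 1).reverse).foldl
    (fun (st : List Char × Int) i =>
      let ds := nums.foldl (fun a num => a + pyIntAt num i) st.2
      (st.1 ++ PySem.Int.toChars (PySem.Int.mod ds 10), PySem.Int.floordiv ds 10)) ([], 0)
  -- total_sum_str[::-1] is reverse
  let total := if r.2 ≠ 0 then (r.1 ++ PySem.Int.toChars r.2).reverse else r.1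
  String.ofList (PySem.List.slice total none (some n))

-- ===== PORT B =====
-- Source B's _column_sums: scatter pass, per number then per column; cols[i] += int(num[i])
-- (i ranges over range(num_length) so i ≥ 0 and .set i.toNat is exact; [0]*num_length is pyRepeat).
def columnSums (nums : List String) (num_length : Int) : List Int :=
  nums.foldl (fun cs num =>
      (PySem.List.pyRange 0 num_length 1).foldl
        (fun cs i => cs.set i.toNat (PySem.List.pyGetD cs i 0 + pyIntAt num i)) cs)
    (PySem.List.pyRepeat [0] num_length)

-- Source B's _carry_pass: while i >= 0 walking i = k-1, k-2, …, 0 as structural recursion on the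
-- count k of remaining columns; returns (pieces LSB-first, final carry).  cols[i] is pyGetD
-- (i ≥ 0 throughout the loop, so the default is never reached; length mismatches are outside Pre_).
def carryPass (cols : List Int) : Nat → Int → List (List Char) × Int
  | 0, carry => ([], carry)
  | k + 1, carry =>
      let ds := carry + PySem.List.pyGetD cols (k : Int) 0
      let rest := carryPass cols k (PySem.Int.floordiv ds 10)
      (PySem.Int.toChars (PySem.Int.mod ds 10) :: rest.1, rest.2)

-- Source B's solution_13: stage 1, stage 2, join the pieces once, then A's exact tail.
-- The while loop runs for i = num_length-1 … 0, i.e. num_length.toNat iterations (none if num_length ≤ 0).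
def solution_13_alt (nums : List String) (num_length : Int) (n : Int) : String :=
  let cols := columnSums nums num_length
  let pc := carryPass cols num_length.toNat 0
  let total := pc.1.flatten  -- "".join(pieces)
  let total := if pc.2 ≠ 0 then (total ++ PySem.Int.toChars pc.2).reverse else total
  String.ofList (PySem.List.slice total none (some n))

-- ===== PRECONDITION & SPEC =====
-- Pre_: exactly where Python A returns normally: each number has at least num_length characters and its
-- first num_length characters are decimal digits (else num[i] raises IndexError or int(num[i]) ValueError).
def Pre_solution_13 (nums : List String) (num_length : Int) (n : Int) : Prop :=
  (nums.all (fun num =>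
    decide (num_length ≤ (num.toList.length : Int)) &&
    (num.toList.take num_length.toNat).all Char.isDigit)) = true
instance (nums : List String) (num_length : Int) (n : Int) : Decidable (Pre_solution_13 nums num_length n) := by unfold Pre_solution_13; infer_instance
def pvWitness_solution_13 : List String × Int × Int := (["123", "456", "789"], 3, 2)

def Spec_solution_13 (nums : List String) (num_length : Int) (n : Int) (out : String) : Prop := out = solution_13_alt nums num_length n
instance (nums : List String) (num_length : Int) (n : Int) (out : String) : Decidable (Spec_solution_13 nums num_length n out) := by unfold Spec_solution_13; infer_instance

-- ===== CLAIM (what is proved, stated in full; the proofs are below) =====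
def Claim_equal_solution_13 : Prop := ∀ (nums : List String) (num_length : Int) (n : Int), Dom_solution_13 nums num_length n → Pre_solution_13 nums num_length n → Spec_solution_13 nums num_length n (solution_13 nums num_length n)

-- ===== LEMMAS AND PROOFS =====

-- Column sum of digit i over all numbers.
def colSum (nums : List String) (i : Int) : Int := (nums.map (fun num => pyIntAt num i)).sum

-- One scatter step over range(m) in Nat form: closed form of B's inner loop.
theorem scatter_inner (d : Nat → Int) (cs : List Int) (m : Nat) (hm : m ≤ cs.length) :
    (List.range m).foldl (fun cs k => cs.set k (cs.getD k 0 + d k)) cs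
      = (List.range m).map (fun k => cs.getD k 0 + d k) ++ cs.drop m := by
  induction m with
  | zero => simp
  | succ m ih =>
    have hlt : m < cs.length := hm
    rw [List.range_succ, List.foldl_append, List.map_append, ih (Nat.le_of_succ_le hm)]
    simp only [List.foldl_cons, List.foldl_nil, List.map_cons, List.map_nil]
    have hlen : ((List.range m).map (fun k => cs.getD k 0 + d k)).length = m := by simp
    have hgetD : ((List.range m).map (fun k => cs.getD k 0 + d k) ++ cs.drop m).getD m 0 = cs.getD m 0 := by
      rw [List.getD_eq_getElem?_getD, List.getElem?_append_right (by omega), hlen]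
      simp [List.getD_eq_getElem?_getD, List.getElem?_drop, List.getElem?_eq_getElem hlt]
    rw [hgetD, List.set_append_right _ _ (by omega), hlen, Nat.sub_self,
      List.drop_eq_getElem_cons hlt, List.set_cons_zero]
    simp

-- B's outer scatter loop over nums, starting from a fully mapped table.
theorem scatter_outer (nums : List String) (L : Nat) (g : Nat → Int) :
    nums.foldl (fun cs num =>
        (List.range L).foldl (fun cs k => cs.set k (cs.getD k 0 + pyIntAt num (k : Int))) cs)
        ((List.range L).map g)
      = (List.range L).map (fun k => g k + colSum nums (k : Int)) := by
  induction nums generalizing g with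
  | nil => simp [colSum]
  | cons num rest ih =>
    rw [List.foldl_cons]
    have hmap : ∀ k < L, ((List.range L).map g).getD k 0 = g k := by
      intro k hk
      rw [List.getD_eq_getElem?_getD]
      simp [List.getElem?_map, List.getElem?_range hk]
    have hstep : (List.range L).foldl (fun cs k => cs.set k (cs.getD k 0 + pyIntAt num (k : Int)))
        ((List.range L).map g) = (List.range L).map (fun k => g k + pyIntAt num (k : Int)) := by
      rw [scatter_inner (fun k => pyIntAt num (k : Int)) _ L (by simp)]
      rw [List.drop_eq_nil_of_le (by simp), List.append_nil]
      exact List.map_congr_left (fun k hk => by rw [hmap k (List.mem_range.mp hk)])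
    rw [hstep, ih]
    exact List.map_congr_left (fun k hk => by simp [colSum]; ring)

-- The table built by port B is exactly the map of column sums.
theorem cols_eq (nums : List String) (L : Int) :
    columnSums nums L = (List.range L.toNat).map (fun (k : Nat) => colSum nums (k : Int)) := by
  unfold columnSums
  have hrep : PySem.List.pyRepeat ([0] : List Int) L = (List.range L.toNat).map (fun _ => 0) := by
    rw [PySem.List.pyRepeat_singleton, List.map_const']
    simp
  have hrange : PySem.List.pyRange 0 L 1 = (List.range L.toNat).map (fun (k : Nat) => (k : Int)) := by
    rw [PySem.List.pyRange_one]; norm_num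
  rw [hrep, hrange]
  have hfun : (fun (cs : List Int) num =>
        ((List.range L.toNat).map (fun (k : Nat) => (k : Int))).foldl
          (fun cs i => cs.set i.toNat (PySem.List.pyGetD cs i 0 + pyIntAt num i)) cs)
      = (fun (cs : List Int) num =>
        (List.range L.toNat).foldl (fun cs k => cs.set k (cs.getD k 0 + pyIntAt num (k : Int))) cs) := by
    funext cs num
    rw [List.foldl_map]
    congr 1
    funext cs k
    rw [PySem.List.pyGetD_natCast]
    simp
  rw [hfun, scatter_outer]
  simp

-- Char-string fold (A's shape) appending over a prefix: one piece-carry step at a time.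
theorem strfold_prefix (d : Nat → Int) (l : List Nat) (s t : List Char) (c : Int) :
    l.foldl (fun (st : List Char × Int) k =>
        (st.1 ++ PySem.Int.toChars (PySem.Int.mod (st.2 + d k) 10),
         PySem.Int.floordiv (st.2 + d k) 10)) (s ++ t, c)
    = ((s ++ (l.foldl (fun (st : List Char × Int) k =>
        (st.1 ++ PySem.Int.toChars (PySem.Int.mod (st.2 + d k) 10),
         PySem.Int.floordiv (st.2 + d k) 10)) (t, c)).1),
       (l.foldl (fun (st : List Char × Int) k =>
        (st.1 ++ PySem.Int.toChars (PySem.Int.mod (st.2 + d k) 10),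
         PySem.Int.floordiv (st.2 + d k) 10)) (t, c)).2) := by
  induction l generalizing t c with
  | nil => simp
  | cons x xs ih =>
    simp only [List.foldl_cons]
    rw [List.append_assoc] at *
    exact ih (t ++ PySem.Int.toChars (PySem.Int.mod (c + d x) 10)) _

-- B's recursive carry pass, flattened, equals A's char-string fold over reversed range.
theorem carryPass_eq (d : Nat → Int) (cols : List Int) (k : Nat)
    (hc : ∀ j < k, PySem.List.pyGetD cols (j : Int) 0 = d j) (c : Int) :
    (((carryPass cols k c).1).flatten, (carryPass cols k c).2)
    = ((List.range k).reverse).foldl (fun (st : List Char × Int) j =>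
        (st.1 ++ PySem.Int.toChars (PySem.Int.mod (st.2 + d j) 10),
         PySem.Int.floordiv (st.2 + d j) 10)) ([], c) := by
  induction k generalizing c with
  | zero => simp [carryPass]
  | succ k ih =>
    have ih' := ih (fun j hj => hc j (Nat.lt_succ_of_lt hj))
    simp only [carryPass, hc k (Nat.lt_succ_self k)]
    rw [List.range_succ, List.reverse_append, List.reverse_singleton, List.singleton_append,
      List.foldl_cons]
    simp only [List.nil_append]
    have hpre := strfold_prefix d ((List.range k).reverse)
      (PySem.Int.toChars (PySem.Int.mod (c + d k) 10)) [] (PySem.Int.floordiv (c + d k) 10)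
    rw [List.append_nil] at hpre
    rw [hpre, ← ih' (PySem.Int.floordiv (c + d k) 10)]
    simp

-- ===== VERDICT (by name: the statement is the Claim_ definition above) =====
theorem solution_13_spec : Claim_equal_solution_13 := by
  intro nums L n _ _
  show solution_13 nums L n = solution_13_alt nums L n
  unfold solution_13 solution_13_alt
  simp only
  rw [cols_eq]
  have hrange : PySem.List.pyRange 0 L 1 = (List.range L.toNat).map (fun (k : Nat) => (k : Int)) := by
    rw [PySem.List.pyRange_one]; norm_num
  -- A's fold: replace the inner scan by colSum, pass to Nat indices
  have hfold : ((PySem.List.pyRange 0 L 1).reverse).foldl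
      (fun (st : List Char × Int) i =>
        let ds := nums.foldl (fun a num => a + pyIntAt num i) st.2
        (st.1 ++ PySem.Int.toChars (PySem.Int.mod ds 10), PySem.Int.floordiv ds 10)) ([], 0)
    = ((List.range L.toNat).reverse).foldl (fun (st : List Char × Int) (k : Nat) =>
        (st.1 ++ PySem.Int.toChars (PySem.Int.mod (st.2 + colSum nums (k : Int)) 10),
         PySem.Int.floordiv (st.2 + colSum nums (k : Int)) 10)) ([], 0) := by
    rw [hrange, ← List.map_reverse, List.foldl_map]
    apply PySem.List.foldl_congr_mem
    intro st k _
    have h1 : nums.foldl (fun a num => a + pyIntAt num (k : Int)) st.2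
        = st.2 + colSum nums (k : Int) := by
      rw [PySem.List.foldl_add]; rfl
    simp only [h1]
  rw [hfold]
  -- B's carry pass, flattened, is the same fold
  have hc : ∀ j < L.toNat, PySem.List.pyGetD
      ((List.range L.toNat).map (fun (k : Nat) => colSum nums (k : Int))) (j : Int) 0
      = colSum nums (j : Int) := by
    intro j hj
    rw [PySem.List.pyGetD_natCast, List.getD_eq_getElem?_getD]
    simp [List.getElem?_map, List.getElem?_range hj]
  have hB := carryPass_eq (fun k => colSum nums (k : Int)) _ L.toNat hc 0
  have h1 := congrArg Prod.fst hB
  have h2 := congrArg Prod.snd hB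
  simp only at h1 h2
  rw [← h1, ← h2]
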